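-- pv_equiv track=rewrite | github.com/jhoel100/Seguridad2 | workbench.py | get_trigrams
-- ===== SOURCE A (Python) =====
-- def get_trigrams(msg):
--     # trigram = [0]*3
--     msg = [c for c in msg]
--     pmatch = [0] * 3
--     tcount = dict()
--     tpos = dict()
--     for i in range(len(msg) - 2):
--         trigram = msg[i:i + 3]
--         str_trigram = ''.join(trigram)
--         if str_trigram not in tcount:
--             tcount[str_trigram] = 0
--             tpos[str_trigram] = []
--             previdx = -1
--             for j in range(len(msg) - 2):
--                 if i + 1 <= j and j <= i + 2:
--                     continue
--                 pmatch = msg[j:j + 3]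
--                 if pmatch == trigram:
--                     tcount[str_trigram] += 1
--                     len_tri = len(tpos[str_trigram])
--                     if previdx != -1:
--                         tpos[str_trigram].append(j - previdx)
--                     previdx = j
--     return tcount, tpos
-- ===== SOURCE B (Python) =====
-- def get_trigrams(msg):
--     pos = {}
--     for i in range(len(msg) - 2):
--         pos.setdefault(msg[i:i + 3], []).append(i)
--     tcount, tpos = {}, {}
--     for t, ps in pos.items():
--         # a repeat that overlaps the trigram's first occurrence is not an
--         # independent repetition: keep the first occurrence and the repeats
--         # starting at least 3 characters after it
--         occ = [p for p in ps if p == ps[0] or p - ps[0] >= 3]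
--         tcount[t] = len(occ)
--         tpos[t] = [b - a for a, b in zip(occ, occ[1:])]
--     return tcount, tpos
-- ===== Notes on version B (the rewrite author's own statement) =====
-- stated objective: faster
-- what changed: A rescans the whole string once per distinct trigram (nested quadratic scans); B makes a single pass indexing each trigram's positions in a dict and then, per trigram, keeps the first occurrence plus the non-overlapping repeats and reads count and gaps off that position list.
import Mathlib
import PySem

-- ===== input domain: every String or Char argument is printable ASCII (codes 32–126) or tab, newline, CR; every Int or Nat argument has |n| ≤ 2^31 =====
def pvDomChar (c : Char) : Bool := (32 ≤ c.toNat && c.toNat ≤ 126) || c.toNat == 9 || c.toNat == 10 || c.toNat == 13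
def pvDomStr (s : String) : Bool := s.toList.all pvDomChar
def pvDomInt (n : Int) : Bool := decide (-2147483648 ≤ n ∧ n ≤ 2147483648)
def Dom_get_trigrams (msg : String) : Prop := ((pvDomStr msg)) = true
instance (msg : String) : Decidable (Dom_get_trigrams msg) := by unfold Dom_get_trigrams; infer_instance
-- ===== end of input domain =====

-- B replaces A's per-trigram rescan of the whole string by one indexing pass (trigram → its
-- positions) plus per-trigram work on the position lists; objective: faster.
-- Return value only.

-- ===== PORT A =====
def get_trigrams (msg : String) : (List (String × Int)) × (List (String × List Int)) :=
  let m := msg.toList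
  let n : Int := (m.length : Int)
  let st := (PySem.List.pyRange 0 (n - 2) 1).foldl
    (fun (st : PySem.Dict String Int × PySem.Dict String (List Int)) i =>
      let trigram := PySem.List.slice m (some i) (some (i + 3))
      let str_trigram := String.ofList trigram        -- ''.join(trigram)
      if st.1.contains str_trigram then st            -- 'if str_trigram not in tcount:' (skip when present)
      else
        let tcount := st.1.insert str_trigram 0
        let tpos := st.2.insert str_trigram []
        let inner := (PySem.List.pyRange 0 (n - 2) 1).foldl
          (fun (s : PySem.Dict String Int × PySem.Dict String (List Int) × Int) j =>
            if i + 1 ≤ j ∧ j ≤ i + 2 then s           -- 'continue'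
            else
              if PySem.List.slice m (some j) (some (j + 3)) = trigram then
                (s.1.modify str_trigram 0 (· + 1),    -- tcount[t] += 1 (key present, exact)
                 (if s.2.2 ≠ -1 then s.2.1.modify str_trigram [] (· ++ [j - s.2.2]) else s.2.1),
                 j)                                   -- previdx = j
              else s)
          (tcount, tpos, (-1 : Int))
        (inner.1, inner.2.1))
    (PySem.Dict.empty, PySem.Dict.empty)
  (st.1.items, st.2.items)

-- ===== PORT B =====
def get_trigrams_alt (msg : String) : (List (String × Int)) × (List (String × List Int)) :=
  let m := msg.toList
  let n : Int := (m.length : Int)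
  -- one pass: pos.setdefault(msg[i:i+3], []).append(i)
  let pos := (PySem.List.pyRange 0 (n - 2) 1).foldl
    (fun (d : PySem.Dict String (List Int)) i =>
      d.modify (String.ofList (PySem.List.slice m (some i) (some (i + 3)))) [] (· ++ [i]))
    PySem.Dict.empty
  -- per trigram: keep the first occurrence and the repeats starting ≥ 3 chars after it,
  -- then count and gap lists (ps[0] read as headD 0: every stored list is nonempty)
  let st := pos.items.foldl
    (fun (st : PySem.Dict String Int × PySem.Dict String (List Int)) p =>
      let occ := p.2.filter (fun q => decide (q = p.2.headD 0 ∨ 3 ≤ q - p.2.headD 0))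
      let gaps := (occ.zip (occ.drop 1)).map (fun ab => ab.2 - ab.1)
      (st.1.insert p.1 (occ.length : Int), st.2.insert p.1 gaps))
    (PySem.Dict.empty, PySem.Dict.empty)
  (st.1.items, st.2.items)

-- ===== PRECONDITION & SPEC =====
def Spec_get_trigrams (msg : String) (out : (List (String × Int)) × (List (String × List Int))) : Prop := out = get_trigrams_alt msg
instance (msg : String) (out : (List (String × Int)) × (List (String × List Int))) : Decidable (Spec_get_trigrams msg out) := by unfold Spec_get_trigrams; infer_instance

-- ===== CLAIM (what is proved, stated in full; the proofs are below) =====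
def Claim_equal_get_trigrams : Prop := ∀ (msg : String), Dom_get_trigrams msg → Spec_get_trigrams msg (get_trigrams msg)

-- ===== LEMMAS AND PROOFS =====

-- proof-only abbreviations
def pvTrig (m : List Char) (i : Int) : String := String.ofList (PySem.List.slice m (some i) (some (i + 3)))
def pvRng (m : List Char) : List Int := PySem.List.pyRange 0 ((m.length : Int) - 2) 1
def pvPos (m : List Char) (t : String) : List Int := (pvRng m).filter (fun j => pvTrig m j == t)
def pvKept (ps : List Int) : List Int := ps.filter (fun q => decide (q ≠ ps.headD 0 + 1 ∧ q ≠ ps.headD 0 + 2))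
def pvCnt (ps : List Int) : Int := ((pvKept ps).length : Int)
def pvGaps (ps : List Int) : List Int := ((pvKept ps).zip ((pvKept ps).drop 1)).map (fun ab => ab.2 - ab.1)
def pvKeptB (ps : List Int) : List Int := ps.filter (fun q => decide (q = ps.headD 0 ∨ 3 ≤ q - ps.headD 0))
def pvCntB (ps : List Int) : Int := ((pvKeptB ps).length : Int)
def pvGapsB (ps : List Int) : List Int := ((pvKeptB ps).zip ((pvKeptB ps).drop 1)).map (fun ab => ab.2 - ab.1)
-- the values the two ports compute
def pvCanon (m : List Char) : (List (String × Int)) × (List (String × List Int)) :=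
  ((PySem.Set.ofList ((pvRng m).map (pvTrig m))).map (fun t => (t, pvCnt (pvPos m t))),
   (PySem.Set.ofList ((pvRng m).map (pvTrig m))).map (fun t => (t, pvGaps (pvPos m t))))
def pvCanonB (m : List Char) : (List (String × Int)) × (List (String × List Int)) :=
  ((PySem.Set.ofList ((pvRng m).map (pvTrig m))).map (fun t => (t, pvCntB (pvPos m t))),
   (PySem.Set.ofList ((pvRng m).map (pvTrig m))).map (fun t => (t, pvGapsB (pvPos m t))))

lemma insert_modify_self {κ ν : Type} [BEq κ] [LawfulBEq κ] (d : PySem.Dict κ ν) (k : κ) (v d0 : ν) (f : ν → ν) :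
    (d.insert k v).modify k d0 f = d.insert k (f v) := by
  simp [PySem.Dict.modify, PySem.Dict.getD_insert_self, PySem.Dict.insert_insert_self]

-- A's inner-loop updates, with the dict state peeled off
def pvSimple (s : Int × List Int × Int) (j : Int) : Int × List Int × Int :=
  (s.1 + 1, (if s.2.2 ≠ -1 then s.2.1 ++ [j - s.2.2] else s.2.1), j)

def pvStepP (m : List Char) (i : Int) (tg : List Char) (s : Int × List Int × Int) (j : Int) : Int × List Int × Int :=
  if i + 1 ≤ j ∧ j ≤ i + 2 then s
  else if PySem.List.slice m (some j) (some (j + 3)) = tg then pvSimple s j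
  else s

lemma simpleFold : ∀ (ks : List Int) (c : Int) (g : List Int) (prev : Int), 0 ≤ prev → (∀ k ∈ ks, 0 ≤ k) →
    ks.foldl pvSimple (c, g, prev) =
      (c + (ks.length : Int), g ++ ((prev :: ks).zip ks).map (fun ab => ab.2 - ab.1), ks.getLastD prev) := by
  intro ks
  induction ks with
  | nil => intro c g prev _ _; simp
  | cons k t ih =>
    intro c g prev hprev hks
    have hk : (0:Int) ≤ k := hks k (by simp)
    have h1 : pvSimple (c, g, prev) k = (c + 1, g ++ [k - prev], k) := by
      simp [pvSimple]; omega
    simp only [List.foldl_cons, h1, ih (c+1) (g ++ [k - prev]) k hk (fun x hx => hks x (by simp [hx]))]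
    refine Prod.ext ?_ (Prod.ext ?_ ?_)
    · show c + 1 + (t.length : Int) = c + ((k :: t).length : Int); simp; ring
    · show g ++ [k - prev] ++ _ = g ++ _
      simp [List.zip_cons_cons]
    · show t.getLastD k = (k :: t).getLastD prev
      cases t <;> simp [List.getLastD]

lemma keptFold (ks : List Int) (h : ∀ k ∈ ks, 0 ≤ k) :
    ks.foldl pvSimple (0, [], -1) =
      ((ks.length : Int), (ks.zip (ks.drop 1)).map (fun ab => ab.2 - ab.1), ks.getLastD (-1)) := by
  cases ks with
  | nil => simp
  | cons k t =>
    have h1 : pvSimple (0, [], -1) k = (1, [], k) := by simp [pvSimple]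
    simp only [List.foldl_cons, h1,
      simpleFold t 1 [] k (h k (by simp)) (fun x hx => h x (by simp [hx]))]
    refine Prod.ext ?_ (Prod.ext ?_ ?_)
    · simp; ring
    · simp
    · cases t <;> simp [List.getLastD]

-- A's inner loop over the dict state, reduced to the pure fold
lemma innerA (m : List Char) (i : Int) (tg : List Char) (t : String)
    (tc : PySem.Dict String Int) (tp : PySem.Dict String (List Int)) :
    ∀ (L : List Int) (c : Int) (g : List Int) (prev : Int),
    L.foldl
      (fun (s : PySem.Dict String Int × PySem.Dict String (List Int) × Int) j =>
        if i + 1 ≤ j ∧ j ≤ i + 2 then s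
        else
          if PySem.List.slice m (some j) (some (j + 3)) = tg then
            (s.1.modify t 0 (· + 1),
             (if s.2.2 ≠ -1 then s.2.1.modify t [] (· ++ [j - s.2.2]) else s.2.1), j)
          else s)
      (tc.insert t c, tp.insert t g, prev)
    = (tc.insert t (L.foldl (pvStepP m i tg) (c, g, prev)).1,
       tp.insert t (L.foldl (pvStepP m i tg) (c, g, prev)).2.1,
       (L.foldl (pvStepP m i tg) (c, g, prev)).2.2) := by
  intro L
  induction L with
  | nil => intro c g prev; simp
  | cons j L ih =>
    intro c g prev
    by_cases hskip : i + 1 ≤ j ∧ j ≤ i + 2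
    · have hstep : pvStepP m i tg (c, g, prev) j = (c, g, prev) := by
        simp only [pvStepP, if_pos hskip]
      simp only [List.foldl_cons, if_pos hskip, hstep, ih]
    · by_cases hm : PySem.List.slice m (some j) (some (j + 3)) = tg
      · have e1 : (tc.insert t c).modify t 0 (· + 1) = tc.insert t (c + 1) :=
          insert_modify_self tc t c 0 _
        have e2 : (if prev ≠ -1 then (tp.insert t g).modify t [] (· ++ [j - prev]) else tp.insert t g)
            = tp.insert t (if prev ≠ -1 then g ++ [j - prev] else g) := by
          by_cases hp : prev ≠ -1
          · simp only [if_pos hp, insert_modify_self]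
          · simp only [if_neg hp]
        have hstep : pvStepP m i tg (c, g, prev) j =
            (c + 1, (if prev ≠ -1 then g ++ [j - prev] else g), j) := by
          simp only [pvStepP, if_neg hskip, if_pos hm, pvSimple]
        simp only [List.foldl_cons, if_neg hskip, if_pos hm, e1, e2, hstep, ih]
      · have hstep : pvStepP m i tg (c, g, prev) j = (c, g, prev) := by
          simp only [pvStepP, if_neg hskip, if_neg hm]
        simp only [List.foldl_cons, if_neg hskip, if_neg hm, hstep, ih]

lemma pureReduce (m : List Char) (i : Int) (tg : List Char) (L : List Int) (init : Int × List Int × Int) :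
    L.foldl (pvStepP m i tg) init
      = ((L.filter (fun j => PySem.List.slice m (some j) (some (j + 3)) == tg)).filter
           (fun q => decide (q ≠ i + 1 ∧ q ≠ i + 2))).foldl pvSimple init := by
  have h1 : pvStepP m i tg = fun s j =>
      if ¬(i + 1 ≤ j ∧ j ≤ i + 2) then
        (fun (s : Int × List Int × Int) j =>
          if PySem.List.slice m (some j) (some (j + 3)) = tg then pvSimple s j else s) s j
      else s := by
    funext s j; simp only [pvStepP, ite_not]
  rw [h1, PySem.List.foldl_ite_eq_foldl_filter, PySem.List.foldl_ite_eq_foldl_filter]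
  congr 1
  rw [List.filter_filter, List.filter_filter]
  apply List.filter_congr
  intro j _
  have h2 : (decide (¬(i + 1 ≤ j ∧ j ≤ i + 2))) = decide (j ≠ i + 1 ∧ j ≠ i + 2) :=
    decide_eq_decide.mpr (by omega)
  by_cases hm : PySem.List.slice m (some j) (some (j + 3)) = tg <;>
    simp only [hm, decide_true, decide_false, Bool.true_and, Bool.false_and, h2] <;> simp [hm]

-- the canonical outer state of A after a set S of trigrams has been handled
def pvStA (m : List Char) (S : List String) : PySem.Dict String Int × PySem.Dict String (List Int) :=
  (PySem.Dict.mk (S.map (fun t => (t, pvCnt (pvPos m t)))),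
   PySem.Dict.mk (S.map (fun t => (t, pvGaps (pvPos m t)))))

-- A's outer step, named (definitionally the fold function of the port of A)
def pvAStep (m : List Char) (st : PySem.Dict String Int × PySem.Dict String (List Int)) (i : Int) :
    PySem.Dict String Int × PySem.Dict String (List Int) :=
  let trigram := PySem.List.slice m (some i) (some (i + 3))
  let str_trigram := String.ofList trigram
  if st.1.contains str_trigram then st
  else
    let tcount := st.1.insert str_trigram 0
    let tpos := st.2.insert str_trigram []
    let inner := (PySem.List.pyRange 0 ((m.length : Int) - 2) 1).foldl
      (fun (s : PySem.Dict String Int × PySem.Dict String (List Int) × Int) j =>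
        if i + 1 ≤ j ∧ j ≤ i + 2 then s
        else
          if PySem.List.slice m (some j) (some (j + 3)) = trigram then
            (s.1.modify str_trigram 0 (· + 1),
             (if s.2.2 ≠ -1 then s.2.1.modify str_trigram [] (· ++ [j - s.2.2]) else s.2.1),
             j)
          else s)
      (tcount, tpos, (-1 : Int))
    (inner.1, inner.2.1)

lemma outerA (m : List Char) : ∀ (suf pre : List Int), pre ++ suf = pvRng m →
    suf.foldl (pvAStep m) (pvStA m (PySem.Set.ofList (pre.map (pvTrig m))))
      = pvStA m (PySem.Set.ofList ((pre ++ suf).map (pvTrig m))) := by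
  intro suf
  induction suf with
  | nil => intro pre _; simp
  | cons i suf ih =>
    intro pre h
    have h' : (pre ++ [i]) ++ suf = pvRng m := by simpa using h
    set t := pvTrig m i with ht
    set S : List String := PySem.Set.ofList (pre.map (pvTrig m)) with hS
    have htr : String.ofList (PySem.List.slice m (some i) (some (i + 3))) = t := rfl
    have hcont : (pvStA m S).1.contains t = decide (t ∈ S) := by
      simp [pvStA, PySem.Dict.contains_mk, List.any_eq]
    have hcont2 : (pvStA m S).2.contains t = decide (t ∈ S) := by
      simp [pvStA, PySem.Dict.contains_mk, List.any_eq]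
    have hset : PySem.Set.ofList ((pre ++ [i]).map (pvTrig m)) = PySem.Set.add S t := by
      rw [List.map_append, PySem.Set.ofList_eq_foldl, List.foldl_append, ← PySem.Set.ofList_eq_foldl]
      rfl
    by_cases hmem : t ∈ S
    · have hadd : PySem.Set.add S t = S := by
        simp [PySem.Set.add, PySem.Set.contains, hmem]
      have hc1 : (pvStA m S).1.contains (String.ofList (PySem.List.slice m (some i) (some (i + 3)))) = true := by
        rw [htr, hcont]; simp [hmem]
      have hstep : pvAStep m (pvStA m S) i = pvStA m S := by
        simp only [pvAStep, hc1, if_true]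
      calc (i :: suf).foldl (pvAStep m) (pvStA m S)
          = suf.foldl (pvAStep m) (pvStA m (PySem.Set.ofList ((pre ++ [i]).map (pvTrig m)))) := by
            rw [List.foldl_cons, hstep, hset, hadd]
        _ = pvStA m (PySem.Set.ofList (((pre ++ [i]) ++ suf).map (pvTrig m))) := ih (pre ++ [i]) h'
        _ = pvStA m (PySem.Set.ofList ((pre ++ i :: suf).map (pvTrig m))) := by simp
    · have hadd : PySem.Set.add S t = S ++ [t] := by
        simp [PySem.Set.add, PySem.Set.contains, hmem]
      have hc1 : (pvStA m S).1.contains (String.ofList (PySem.List.slice m (some i) (some (i + 3)))) = false := by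
        rw [htr, hcont]; simp [hmem]
      have hc2 : (pvStA m S).2.contains t = false := by rw [hcont2]; simp [hmem]
      have hc1' : (pvStA m S).1.contains t = false := by rw [hcont]; simp [hmem]
      -- i is the first occurrence of its trigram
      have hpre : pre.filter (fun j => pvTrig m j == t) = [] := by
        rw [List.filter_eq_nil_iff]
        intro j hj
        simp only [beq_iff_eq]
        intro hjt
        exact hmem (by rw [hS, PySem.Set.mem_ofList, ← hjt]; exact List.mem_map_of_mem hj)
      have hps : pvPos m t = i :: suf.filter (fun j => pvTrig m j == t) := by
        rw [pvPos, ← h, List.filter_append, hpre, List.nil_append, List.filter_cons,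
          if_pos (by simp [ht])]
      have hhead : (pvPos m t).headD 0 = i := by rw [hps]; rfl
      have hnn : ∀ k ∈ pvKept (pvPos m t), (0:Int) ≤ k := by
        intro k hk
        have hk1 : k ∈ pvPos m t := List.mem_of_mem_filter hk
        have hk2 : k ∈ pvRng m := List.mem_of_mem_filter hk1
        have := (PySem.List.mem_pyRange_one).mp hk2
        omega
      -- the positions scanned by A's inner loop are exactly the kept positions of t
      have hfilt : ((pvRng m).filter
            (fun j => PySem.List.slice m (some j) (some (j + 3)) == PySem.List.slice m (some i) (some (i + 3)))).filter
            (fun q => decide (q ≠ i + 1 ∧ q ≠ i + 2)) = pvKept (pvPos m t) := by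
        simp only [pvKept, hhead]
        congr 1
        apply List.filter_congr
        intro j _
        have hiff : (PySem.List.slice m (some j) (some (j + 3)) = PySem.List.slice m (some i) (some (i + 3)))
            ↔ (pvTrig m j = t) := by
          rw [ht, pvTrig, pvTrig, String.ofList_inj]
        by_cases hc : PySem.List.slice m (some j) (some (j + 3)) = PySem.List.slice m (some i) (some (i + 3))
        · simp [hc, hiff.mp hc]
        · have hne : pvTrig m j ≠ t := fun hh => hc (hiff.mpr hh)
          simp [hc, hne]
      have hp1 : ((pvRng m).foldl (pvStepP m i (PySem.List.slice m (some i) (some (i + 3)))) (0, [], -1)).1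
          = pvCnt (pvPos m t) := by
        rw [pureReduce, hfilt, keptFold _ hnn]; rfl
      have hp2 : ((pvRng m).foldl (pvStepP m i (PySem.List.slice m (some i) (some (i + 3)))) (0, [], -1)).2.1
          = pvGaps (pvPos m t) := by
        rw [pureReduce, hfilt, keptFold _ hnn]; rfl
      have hval := innerA m i (PySem.List.slice m (some i) (some (i + 3))) t
        (pvStA m S).1 (pvStA m S).2 (pvRng m) 0 [] (-1)
      have hstep : pvAStep m (pvStA m S) i = pvStA m (S ++ [t]) := by
        simp only [pvAStep, htr, hc1', Bool.false_eq_true, if_false]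
        rw [show PySem.List.pyRange 0 ((m.length : Int) - 2) 1 = pvRng m from rfl, hval, hp1, hp2]
        refine Prod.ext ?_ ?_
        · apply PySem.Dict.ext
          show ((pvStA m S).1.insert t (pvCnt (pvPos m t))).items = (pvStA m (S ++ [t])).1.items
          rw [PySem.Dict.items_insert_of_not_contains _ _ hc1']
          show (S.map (fun t => (t, pvCnt (pvPos m t)))) ++ [(t, pvCnt (pvPos m t))] = _
          rw [show (pvStA m (S ++ [t])).1.items = (S ++ [t]).map (fun t => (t, pvCnt (pvPos m t))) from rfl]
          simp
        · apply PySem.Dict.ext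
          show ((pvStA m S).2.insert t (pvGaps (pvPos m t))).items = (pvStA m (S ++ [t])).2.items
          rw [PySem.Dict.items_insert_of_not_contains _ _ hc2]
          show (S.map (fun t => (t, pvGaps (pvPos m t)))) ++ [(t, pvGaps (pvPos m t))] = _
          rw [show (pvStA m (S ++ [t])).2.items = (S ++ [t]).map (fun t => (t, pvGaps (pvPos m t))) from rfl]
          simp
      calc (i :: suf).foldl (pvAStep m) (pvStA m S)
          = suf.foldl (pvAStep m) (pvStA m (PySem.Set.ofList ((pre ++ [i]).map (pvTrig m)))) := by
            rw [List.foldl_cons, hstep, hset, hadd]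
        _ = pvStA m (PySem.Set.ofList (((pre ++ [i]) ++ suf).map (pvTrig m))) := ih (pre ++ [i]) h'
        _ = pvStA m (PySem.Set.ofList ((pre ++ i :: suf).map (pvTrig m))) := by simp

-- A computes the canonical value
lemma A_eq_canon (msg : String) : get_trigrams msg = pvCanon msg.toList := by
  have h0 : get_trigrams msg =
      (((pvRng msg.toList).foldl (pvAStep msg.toList)
          (pvStA msg.toList (PySem.Set.ofList (([] : List Int).map (pvTrig msg.toList))))).1.items,
       ((pvRng msg.toList).foldl (pvAStep msg.toList)
          (pvStA msg.toList (PySem.Set.ofList (([] : List Int).map (pvTrig msg.toList))))).2.items) := rfl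
  rw [h0, outerA msg.toList (pvRng msg.toList) [] (List.nil_append _)]
  rfl

-- B's loops, named (definitionally the fold functions of the port of B)
def pvBPos (m : List Char) : PySem.Dict String (List Int) :=
  (pvRng m).foldl (fun d i => d.modify (pvTrig m i) [] (· ++ [i])) PySem.Dict.empty
def pvBF (st : PySem.Dict String Int) (p : String × List Int) : PySem.Dict String Int :=
  st.insert p.1 (pvCntB p.2)
def pvBG (st : PySem.Dict String (List Int)) (p : String × List Int) : PySem.Dict String (List Int) :=
  st.insert p.1 (pvGapsB p.2)

-- B computes the all-occurrences value
lemma B_eq_canon (msg : String) : get_trigrams_alt msg = pvCanonB msg.toList := by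
  have h0 : get_trigrams_alt msg =
      (((pvBPos msg.toList).items.foldl (fun st p => (pvBF st.1 p, pvBG st.2 p))
          (PySem.Dict.empty, PySem.Dict.empty)).1.items,
       ((pvBPos msg.toList).items.foldl (fun st p => (pvBF st.1 p, pvBG st.2 p))
          (PySem.Dict.empty, PySem.Dict.empty)).2.items) := rfl
  set m := msg.toList with hm
  have hkeys : (pvBPos m).keys = PySem.Set.ofList ((pvRng m).map (pvTrig m)) := by
    rw [pvBPos, PySem.Dict.keys_foldl_modify_key (pvRng m) (pvTrig m) []
      (fun _ i => (· ++ [i])) PySem.Dict.empty]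
    rfl
  have hnod : (pvBPos m).keys.Nodup := by
    rw [hkeys]; exact PySem.Set.nodup_ofList _
  have hget : ∀ t, (pvBPos m).getD t [] = pvPos m t := by
    intro t
    rw [pvBPos, show (pvRng m).foldl (fun d i => d.modify (pvTrig m i) [] (· ++ [i])) PySem.Dict.empty
        = ((pvRng m).map (fun i => (pvTrig m i, i))).foldl
            (fun d p => d.modify p.1 [] (· ++ [p.2])) PySem.Dict.empty from
          (List.foldl_map (f := fun i => (pvTrig m i, i))
            (g := fun d p => d.modify p.1 [] (· ++ [p.2]))
            (l := pvRng m) (init := PySem.Dict.empty)).symm,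
      PySem.Dict.getD_foldl_modify_append]
    rw [List.filter_map, List.map_map]
    simp [pvPos, Function.comp_def]
  have hitems : (pvBPos m).items
      = (PySem.Set.ofList ((pvRng m).map (pvTrig m))).map (fun t => (t, pvPos m t)) := by
    rw [PySem.Dict.items_eq_map_keys (pvBPos m) hnod [], hkeys]
    exact List.map_congr_left (fun t _ => by rw [hget])
  have hfst : ((pvBPos m).items.map (fun p => p.1)).Nodup := hnod
  have h1 : ((pvBPos m).items.foldl pvBF PySem.Dict.empty).items
      = (pvBPos m).items.map (fun p => (p.1, pvCntB p.2)) := by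
    rw [show pvBF = fun st (p : String × List Int) => st.insert p.1 (pvCntB p.2) from rfl,
      PySem.Dict.items_foldl_insert_fresh (pvBPos m).items (fun p => p.1) (fun p => pvCntB p.2)
        PySem.Dict.empty (fun a _ => PySem.Dict.contains_empty _) hfst]
    rfl
  have h2 : ((pvBPos m).items.foldl pvBG PySem.Dict.empty).items
      = (pvBPos m).items.map (fun p => (p.1, pvGapsB p.2)) := by
    rw [show pvBG = fun st (p : String × List Int) => st.insert p.1 (pvGapsB p.2) from rfl,
      PySem.Dict.items_foldl_insert_fresh (pvBPos m).items (fun p => p.1) (fun p => pvGapsB p.2)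
        PySem.Dict.empty (fun a _ => PySem.Dict.contains_empty _) hfst]
    rfl
  rw [h0, PySem.List.foldl_prod_mk pvBF pvBG]
  show (((pvBPos m).items.foldl pvBF PySem.Dict.empty).items,
        ((pvBPos m).items.foldl pvBG PySem.Dict.empty).items) = pvCanonB m
  rw [h1, h2, hitems, List.map_map, List.map_map]
  rfl

-- head of a strictly sorted list is a lower bound
lemma headD_le_of_sorted (l : List Int) (h : l.Pairwise (· < ·)) (x : Int) (hx : x ∈ l) :
    l.headD 0 ≤ x := by
  cases l with
  | nil => cases hx
  | cons a t =>
    rcases List.mem_cons.mp hx with h1 | h1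
    · simp [h1]
    · have := (List.pairwise_cons.mp h).1 x h1
      simp; omega

lemma pos_sorted (m : List Char) (t : String) : (pvPos m t).Pairwise (· < ·) :=
  List.Pairwise.filter _ (PySem.List.pairwise_lt_pyRange_one 0 ((m.length : Int) - 2))

-- within a trigram's (sorted, head-minimal) position list, B's 'overlaps the first
-- occurrence' test and A's 'skip head+1, head+2' test keep exactly the same positions
lemma keptB_eq_kept (m : List Char) (t : String) :
    pvKeptB (pvPos m t) = pvKept (pvPos m t) := by
  apply List.filter_congr
  intro q hq
  have hle := headD_le_of_sorted (pvPos m t) (pos_sorted m t) q hq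
  exact decide_eq_decide.mpr (by omega)

lemma canon_eq (m : List Char) : pvCanon m = pvCanonB m := by
  unfold pvCanon pvCanonB
  refine Prod.ext ?_ ?_
  · exact List.map_congr_left (fun t _ => by
      simp only [pvCnt, pvCntB, keptB_eq_kept])
  · exact List.map_congr_left (fun t _ => by
      simp only [pvGaps, pvGapsB, keptB_eq_kept])

-- ===== VERDICT (by name: the statement is the Claim_ definition above) =====
theorem get_trigrams_spec : Claim_equal_get_trigrams := by
  intro msg _
  unfold Spec_get_trigrams
  rw [A_eq_canon, B_eq_canon, canon_eq]
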